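-- pv_equiv track=rewrite | github.com/millotpg/AdventOfCode | 2020/11/eleven.py | file_people_in
-- ===== SOURCE A (Python) =====
-- def count_seats_in_sight(row, col, data):
--     occupied_seats = 0
--     max_col = len(data[0])
--     max_row = len(data)
--     line_of_sight = {}
--     try:
--         line_of_sight['right'] = data[row][col+1:]
--     except IndexError:
--         line_of_sight['right'] = ''
--     line_of_sight['left'] = data[row][:col][::-1]
--     try:
--         line_of_sight['down'] = ''.join([tmp[col] for tmp in data])[row+1:]
--     except IndexError:
--         line_of_sight['down'] = ''
--     line_of_sight['up'] = ''.join([tmp[col] for tmp in data])[:row][::-1]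
--     line_of_sight['up-right'] = ''
--     line_of_sight['up-left'] = ''
--     line_of_sight['down-right'] = ''
--     line_of_sight['down-left'] = ''
--     for index in range(1, max(max_row, max_col)):
--         if (row - index >= 0) and (col - index >= 0):
--             line_of_sight['up-left'] += data[row - index][col - index]
--         if (row + index < max_row) and (col + index < max_col):
--             line_of_sight['down-right'] += data[row + index][col + index]
--         if (row - index >= 0) and (col + index < max_col):
--             line_of_sight['up-right'] += data[row - index][col + index]
--         if (row + index < max_row) and (col - index >= 0):
--             line_of_sight['down-left'] += data[row + index][col - index]
--     for _, val in line_of_sight.items():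
--         val = val.replace('.', '')
--         if val and val[0] == '#':
--             occupied_seats += 1
--     return occupied_seats
--
-- def file_people_in(data):
--     people_moved = False
--     shuffle_move = []
--     max_col = len(data[0])
--     max_row = len(data)
--     for cur_row in range(0, max_row):
--         cur_row_lst = []
--         for cur_col in range(0, max_col):
--             if 'L' == data[cur_row][cur_col]:
--                 if 0 == count_seats_in_sight(cur_row, cur_col, data):
--                     people_moved = True
--                     cur_row_lst.append('#')
--                 else:
--                     cur_row_lst.append('L')
--             elif '#' == data[cur_row][cur_col]:
--                 if 5 <= count_seats_in_sight(cur_row, cur_col, data):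
--                     people_moved = True
--                     cur_row_lst.append('L')
--                 else:
--                     cur_row_lst.append('#')
--             else:
--                 cur_row_lst.append(data[cur_row][cur_col])
--         shuffle_move.append(''.join(cur_row_lst))
--         cur_row = []
--     return people_moved, shuffle_move
-- ===== SOURCE B (Python) =====
-- def file_people_in(data):
--     max_row = len(data)
--     max_col = len(data[0])
--
--     def ray_occupied(r, c, dr, dc):
--         # number of in-sight cells in this direction, in closed form
--         if dr == 0:
--             steps = len(data[r]) - 1 - c if dc == 1 else c
--         elif dc == 0:
--             steps = max_row - 1 - r if dr == 1 else r
--         else: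
--             v = max_row - 1 - r if dr == 1 else r
--             h = max_col - 1 - c if dc == 1 else c
--             steps = min(v, h)
--         for i in range(1, steps + 1):
--             ch = data[r + dr * i][c + dc * i]
--             if ch != '.':
--                 return ch == '#'
--         return False
--
--     def new_char(r, c):
--         ch = data[r][c]
--         if ch not in 'L#':
--             return ch
--         n = sum(ray_occupied(r, c, dr, dc)
--                 for dr in (-1, 0, 1) for dc in (-1, 0, 1) if (dr, dc) != (0, 0))
--         if ch == 'L':
--             return '#' if n == 0 else 'L'
--         return 'L' if n >= 5 else '#'
--
--     rows = [''.join(new_char(r, c) for c in range(max_col)) for r in range(max_row)]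
--     moved = any(rows[r][c] != data[r][c]
--                 for r in range(max_row) for c in range(max_col))
--     return moved, rows
-- ===== Notes on version B (the rewrite author's own statement) =====
-- stated objective: alternative
-- what changed: B replaces A's per-cell construction of eight full line-of-sight strings (slices, a column join, and an interleaved diagonal-building loop over range(1,max(R,C)) followed by replace-and-inspect) with a closed-form ray length per direction and an early-exit walk that stops at the first non-floor cell, and derives the moved flag by comparing the new grid to the old instead of threading a flag through the loops.
import Mathlib
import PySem

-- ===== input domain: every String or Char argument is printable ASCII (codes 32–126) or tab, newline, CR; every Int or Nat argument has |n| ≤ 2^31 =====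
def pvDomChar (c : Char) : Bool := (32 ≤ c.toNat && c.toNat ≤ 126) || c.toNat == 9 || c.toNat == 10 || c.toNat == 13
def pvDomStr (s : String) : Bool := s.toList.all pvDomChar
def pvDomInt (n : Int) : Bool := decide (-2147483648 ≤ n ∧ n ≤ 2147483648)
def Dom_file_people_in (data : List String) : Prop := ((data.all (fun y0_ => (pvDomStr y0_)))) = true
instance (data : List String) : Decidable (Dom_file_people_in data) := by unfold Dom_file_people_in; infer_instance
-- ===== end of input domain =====

-- B replaces A's per-cell construction of eight line-of-sight strings with closed-form
-- ray lengths and an early-exit walk per direction, and derives the moved flag by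
-- comparing the new grid to the old (alternative algorithm, same worst-case cost).

-- ===== PORT A =====
-- grids are handled as List (List Char) (data.map String.toList); exact for Python strings
def pvCell (g : List (List Char)) (r c : Nat) : Char := (g.getD r []).getD c '?'
  -- '?' default is reachable only outside Pre_ (where Python raises IndexError)

-- val.replace('.','') ; truthy and val[0] == '#'
def pvHit (l : List Char) : Bool := (l.filter (fun ch => ch != '.')).head? == some '#'

-- one iteration of A's diagonal-building loop; state = (up-left, down-right, up-right, down-left)
def pvDiagStep (g : List (List Char)) (R C row col : Nat)
    (s : List Char × List Char × List Char × List Char) (index : Nat) :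
    List Char × List Char × List Char × List Char :=
  let ul := if index ≤ row ∧ index ≤ col then s.1 ++ [pvCell g (row - index) (col - index)] else s.1
  let dr := if row + index < R ∧ col + index < C then s.2.1 ++ [pvCell g (row + index) (col + index)] else s.2.1
  let ur := if index ≤ row ∧ col + index < C then s.2.2.1 ++ [pvCell g (row - index) (col + index)] else s.2.2.1
  let dl := if row + index < R ∧ index ≤ col then s.2.2.2 ++ [pvCell g (row + index) (col - index)] else s.2.2.2
  (ul, dr, ur, dl)

-- count_seats_in_sight(row, col, data); the dict with fixed distinct literal keys is ported
-- as named locals, its items() iteration order (= insertion order) as the literal list below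
def pvCountSeats (row col : Nat) (g : List (List Char)) : Nat :=
  let C := (g.getD 0 []).length
  let R := g.length
  let right := (g.getD row []).drop (col + 1)      -- data[row][col+1:] (the except branch is unreachable)
  let left := ((g.getD row []).take col).reverse   -- data[row][:col][::-1]
  let colStr := g.map (fun t => t.getD col '?')    -- ''.join([tmp[col] for tmp in data]); raises outside Pre_
  let down := colStr.drop (row + 1)
  let up := (colStr.take row).reverse
  let diag := (List.range' 1 (max R C - 1)).foldl (pvDiagStep g R C row col) ([], [], [], [])
  [right, left, down, up, diag.2.2.1, diag.1, diag.2.1, diag.2.2.2].foldl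
    (fun occ v => if pvHit v then occ + 1 else occ) 0

-- one inner-loop step (cur_col) and one outer-loop step (cur_row) of A's main loop
def pvStepCol (g : List (List Char)) (cur_row : Nat) (a : Bool × List Char) (cur_col : Nat) : Bool × List Char :=
  let ch := pvCell g cur_row cur_col
  if ch = 'L' then
    if pvCountSeats cur_row cur_col g = 0 then (true, a.2 ++ ['#'])
    else (a.1, a.2 ++ ['L'])
  else if ch = '#' then
    if 5 ≤ pvCountSeats cur_row cur_col g then (true, a.2 ++ ['L'])
    else (a.1, a.2 ++ ['#'])
  else (a.1, a.2 ++ [ch])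

def pvStepRow (g : List (List Char)) (C : Nat) (acc : Bool × List String) (cur_row : Nat) : Bool × List String :=
  let rowRes := (List.range C).foldl (pvStepCol g cur_row) (acc.1, [])
  (rowRes.1, acc.2 ++ [String.ofList rowRes.2])

def file_people_in (data : List String) : Bool × List String :=
  let g := data.map String.toList
  let C := (g.getD 0 []).length
  let R := g.length
  (List.range R).foldl (pvStepRow g C) (false, [])

-- ===== PORT B =====
-- coordinates are Python ints; every access below is guarded non-negative and in range inside Pre_
def pvCellB (g : List (List Char)) (r c : Int) : Char := (g.getD r.toNat []).getD c.toNat '?'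

-- closed-form number of in-bounds cells along the ray (may be ≤ 0: empty ray)
def pvRaySteps (g : List (List Char)) (R C r c dr dc : Int) : Int :=
  if dr = 0 then (if dc = 1 then ((g.getD r.toNat []).length : Int) - 1 - c else c)
  else if dc = 0 then (if dr = 1 then R - 1 - r else r)
  else min (if dr = 1 then R - 1 - r else r) (if dc = 1 then C - 1 - c else c)

-- for i in range(1, steps+1): early return at the first non-floor cell
def pvRayScan (g : List (List Char)) (r c dr dc : Int) : List Int → Bool
  | [] => false
  | i :: rest =>
    let ch := pvCellB g (r + dr * i) (c + dc * i)
    if ch != '.' then ch == '#' else pvRayScan g r c dr dc rest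

def pvRayOcc (g : List (List Char)) (R C r c dr dc : Int) : Bool :=
  pvRayScan g r c dr dc (PySem.List.pyRange 1 (pvRaySteps g R C r c dr dc + 1) 1)

-- the generator's direction order: dr in (-1,0,1), dc in (-1,0,1), skipping (0,0)
def pvDirs : List (Int × Int) := [(-1,-1),(-1,0),(-1,1),(0,-1),(0,1),(1,-1),(1,0),(1,1)]

def pvNewChar (g : List (List Char)) (R C r c : Int) : Char :=
  let ch := pvCellB g r c
  if ch ≠ 'L' ∧ ch ≠ '#' then ch
  else
    let n := pvDirs.foldl (fun (n : Nat) d => n + (if pvRayOcc g R C r c d.1 d.2 then 1 else 0)) 0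
    if ch = 'L' then (if n = 0 then '#' else 'L')
    else (if 5 ≤ n then 'L' else '#')

def file_people_in_alt (data : List String) : Bool × List String :=
  let g := data.map String.toList
  let R : Int := g.length
  let C : Int := (g.getD 0 []).length
  let rowsL := (PySem.List.pyRange 0 R 1).map (fun r =>
    (PySem.List.pyRange 0 C 1).map (fun c => pvNewChar g R C r c))
  let moved := (PySem.List.pyRange 0 R 1).any (fun r =>
    (PySem.List.pyRange 0 C 1).any (fun c => pvCellB rowsL r c != pvCellB g r c))
  (moved, rowsL.map (fun l => String.ofList l))

-- ===== PRECONDITION & SPEC =====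
-- Pre_ excludes exactly the inputs where A raises IndexError: the empty list (data[0])
-- and ragged grids with a row shorter than the first row (tmp[col] in the column join,
-- or data[cur_row][cur_col] in the main loop).
def Pre_file_people_in (data : List String) : Prop :=
  data ≠ [] ∧ ∀ s ∈ data, (data.headD "").toList.length ≤ s.toList.length
instance (data : List String) : Decidable (Pre_file_people_in data) := by
  unfold Pre_file_people_in; infer_instance

def pvWitness_file_people_in : List String := ["L.#", ".#L", "L.."]

def Spec_file_people_in (data : List String) (out : Bool × List String) : Prop := out = file_people_in_alt data
instance (data : List String) (out : Bool × List String) : Decidable (Spec_file_people_in data out) := by unfold Spec_file_people_in; infer_instance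

-- ===== CLAIM (what is proved, stated in full; the proofs are below) =====
def Claim_equal_file_people_in : Prop := ∀ (data : List String), Dom_file_people_in data → Pre_file_people_in data → Spec_file_people_in data (file_people_in data)

-- ===== LEMMAS AND PROOFS =====

-- A line of sight as a map over step indices 1..n
def pvMapD (g : List (List Char)) (f : Nat → Nat × Nat) (n : Nat) : List Char :=
  (List.range' 1 n).map (fun i => pvCell g (f i).1 (f i).2)

theorem pvHit_cons (ch : Char) (l : List Char) :
    pvHit (ch :: l) = if ch = '.' then pvHit l else (ch == '#') := by
  by_cases h : ch = '.' <;> simp [pvHit, h]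

theorem pvScan_eq_hit (g : List (List Char)) (r c dr dc : Int) (is : List Int) :
    pvRayScan g r c dr dc is = pvHit (is.map (fun i => pvCellB g (r + dr * i) (c + dc * i))) := by
  induction is with
  | nil => simp [pvRayScan, pvHit]
  | cons i rest ih =>
    simp only [List.map_cons, pvRayScan, pvHit_cons, ih]
    by_cases h : pvCellB g (r + dr * i) (c + dc * i) = '.' <;> simp [h]

theorem pvDrop_eq_map (l : List Char) (k : Nat) :
    l.drop k = (List.range (l.length - k)).map (fun j => l.getD (k + j) '?') := by
  apply List.ext_getElem
  · simp
  · intro j h1 h2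
    have hk : k + j < l.length := by simp at h1; omega
    simp only [List.getElem_map, List.getElem_range, List.getElem_drop,
      List.getD_eq_getElem l '?' hk]

theorem pvTakeRev_eq_map (l : List Char) (k : Nat) (hk : k ≤ l.length) :
    (l.take k).reverse = (List.range k).map (fun j => l.getD (k - 1 - j) '?') := by
  apply List.ext_getElem
  · simp; omega
  · intro j h1 h2
    simp only [List.length_reverse, List.length_take] at h1
    have hj : j < k := by omega
    have hlt : k - 1 - j < l.length := by omega
    rw [List.getElem_reverse, List.getElem_map, List.getElem_range,
      List.getElem_take, List.getD_eq_getElem l '?' hlt]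
    congr 1
    simp
    omega

theorem pvColStr_getD (g : List (List Char)) (c i : Nat) :
    (g.map (fun t => t.getD c '?')).getD i '?' = pvCell g i c := by
  rcases Nat.lt_or_ge i g.length with h | h
  · rw [List.getD_eq_getElem _ '?' (by simpa using h), List.getElem_map,
      pvCell, List.getD_eq_getElem _ [] h]
  · rw [List.getD_eq_default _ '?' (by simpa using h), pvCell,
      List.getD_eq_default _ [] h]
    rfl

theorem pvMapD_min_succ (g : List (List Char)) (f : Nat → Nat × Nat) (s K : Nat) :
    pvMapD g f (min s (K + 1)) =
      if K + 1 ≤ s then pvMapD g f (min s K) ++ [pvCell g (f (K + 1)).1 (f (K + 1)).2]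
      else pvMapD g f (min s K) := by
  by_cases h : K + 1 ≤ s
  · have h1 : min s (K + 1) = K + 1 := by omega
    have h2 : min s K = K := by omega
    have h3 : 1 + 1 * K = K + 1 := by omega
    rw [h1, h2, if_pos h]
    unfold pvMapD
    rw [List.range'_concat, List.map_append, h3]
    rfl
  · have h1 : min s (K + 1) = min s K := by omega
    rw [h1, if_neg h]

theorem pvDiag_fold (g : List (List Char)) (R C r c : Nat) (hr : r < R) (hc : c < C) :
    ∀ K, (List.range' 1 K).foldl (pvDiagStep g R C r c) ([], [], [], []) =
      (pvMapD g (fun i => (r - i, c - i)) (min (min r c) K),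
       pvMapD g (fun i => (r + i, c + i)) (min (min (R - 1 - r) (C - 1 - c)) K),
       pvMapD g (fun i => (r - i, c + i)) (min (min r (C - 1 - c)) K),
       pvMapD g (fun i => (r + i, c - i)) (min (min (R - 1 - r) c) K)) := by
  intro K
  induction K with
  | zero => simp [pvMapD]
  | succ K ih =>
    rw [List.range'_concat, List.foldl_append, ih]
    have h3 : 1 + 1 * K = K + 1 := by omega
    rw [h3]
    have i1 : (K + 1 ≤ r ∧ K + 1 ≤ c) ↔ K + 1 ≤ min r c := by omega
    have i2 : (r + (K + 1) < R ∧ c + (K + 1) < C) ↔ K + 1 ≤ min (R - 1 - r) (C - 1 - c) := by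
      omega
    have i3 : (K + 1 ≤ r ∧ c + (K + 1) < C) ↔ K + 1 ≤ min r (C - 1 - c) := by omega
    have i4 : (r + (K + 1) < R ∧ K + 1 ≤ c) ↔ K + 1 ≤ min (R - 1 - r) c := by omega
    simp only [List.foldl_cons, List.foldl_nil, pvDiagStep, pvMapD_min_succ, i1, i2, i3, i4]

theorem pvRay_eq (g : List (List Char)) (R C r c dr dc s : Int) (f : Nat → Nat × Nat) (n : Nat)
    (hsteps : pvRaySteps g R C r c dr dc = s) (hn : s.toNat = n)
    (hf : ∀ k, k < n →
      pvCellB g (r + dr * (1 + (k : Int))) (c + dc * (1 + (k : Int))) =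
        pvCell g (f (1 + k)).1 (f (1 + k)).2) :
    pvRayOcc g R C r c dr dc = pvHit (pvMapD g f n) := by
  unfold pvRayOcc
  rw [hsteps, pvScan_eq_hit]
  congr 1
  rw [PySem.List.pyRange_one]
  have h1 : (s + 1 - 1).toNat = n := by omega
  rw [h1]
  unfold pvMapD
  rw [List.range'_eq_map_range, List.map_map, List.map_map]
  apply List.map_congr_left
  intro k hk
  simp only [List.mem_range] at hk
  simpa using hf k hk

theorem pvCellB_eq (g : List (List Char)) (p q : Int) (p' q' : Nat)
    (hp : p.toNat = p') (hq : q.toNat = q') : pvCellB g p q = pvCell g p' q' := by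
  subst hp; subst hq; rfl

theorem pvRight_line (g : List (List Char)) (r c : Nat) :
    (g.getD r []).drop (c + 1) =
      pvMapD g (fun i => (r, c + i)) ((g.getD r []).length - (c + 1)) := by
  rw [pvDrop_eq_map]
  unfold pvMapD
  rw [List.range'_eq_map_range, List.map_map]
  apply List.map_congr_left
  intro k _
  show (g.getD r []).getD (c + 1 + k) '?' = pvCell g r (c + (1 + k))
  unfold pvCell
  congr 1
  omega

theorem pvLeft_line (g : List (List Char)) (r c : Nat) (hc : c ≤ (g.getD r []).length) :
    ((g.getD r []).take c).reverse = pvMapD g (fun i => (r, c - i)) c := by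
  rw [pvTakeRev_eq_map _ _ hc]
  unfold pvMapD
  rw [List.range'_eq_map_range, List.map_map]
  apply List.map_congr_left
  intro k _
  show (g.getD r []).getD (c - 1 - k) '?' = pvCell g r (c - (1 + k))
  unfold pvCell
  congr 1
  omega

theorem pvDown_line (g : List (List Char)) (r c : Nat) :
    (g.map (fun t => t.getD c '?')).drop (r + 1) =
      pvMapD g (fun i => (r + i, c)) (g.length - (r + 1)) := by
  rw [pvDrop_eq_map]
  unfold pvMapD
  rw [List.range'_eq_map_range, List.map_map]
  simp only [List.length_map]
  apply List.map_congr_left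
  intro k _
  show (g.map (fun t => t.getD c '?')).getD (r + 1 + k) '?' = pvCell g (r + (1 + k)) c
  rw [pvColStr_getD]
  congr 1
  omega

theorem pvUp_line (g : List (List Char)) (r c : Nat) (hr : r ≤ g.length) :
    ((g.map (fun t => t.getD c '?')).take r).reverse = pvMapD g (fun i => (r - i, c)) r := by
  rw [pvTakeRev_eq_map _ _ (by simpa using hr)]
  unfold pvMapD
  rw [List.range'_eq_map_range, List.map_map]
  apply List.map_congr_left
  intro k _
  show (g.map (fun t => t.getD c '?')).getD (r - 1 - k) '?' = pvCell g (r - (1 + k)) c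
  rw [pvColStr_getD]
  congr 1
  omega

theorem pvCount_eq (g : List (List Char)) (r c : Nat) (hr : r < g.length)
    (hc : c < (g.getD 0 []).length)
    (hlen : ∀ l ∈ g, (g.getD 0 []).length ≤ l.length) :
    pvCountSeats r c g =
      pvDirs.foldl (fun (n : Nat) d =>
        n + (if pvRayOcc g (g.length : Int) ((g.getD 0 []).length : Int) r c d.1 d.2
             then 1 else 0)) 0 := by
  have hrow : (g.getD 0 []).length ≤ (g.getD r []).length := by
    apply hlen
    rw [List.getD_eq_getElem _ [] hr]
    exact List.getElem_mem hr
  -- the eight "B's ray = hit of A's line" facts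
  have eR : pvRayOcc g (g.length : Int) ((g.getD 0 []).length : Int) r c 0 1 =
      pvHit (pvMapD g (fun i => (r, c + i)) ((g.getD r []).length - (c + 1))) := by
    apply pvRay_eq (s := ((g.getD r []).length : Int) - 1 - c)
    · simp [pvRaySteps]
    · omega
    · intro k hk
      apply pvCellB_eq <;> (simp; try omega)
  have eL : pvRayOcc g (g.length : Int) ((g.getD 0 []).length : Int) r c 0 (-1) =
      pvHit (pvMapD g (fun i => (r, c - i)) c) := by
    apply pvRay_eq (s := (c : Int))
    · simp [pvRaySteps]
    · omega
    · intro k hk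
      apply pvCellB_eq <;> (simp; try omega)
  have eD : pvRayOcc g (g.length : Int) ((g.getD 0 []).length : Int) r c 1 0 =
      pvHit (pvMapD g (fun i => (r + i, c)) (g.length - (r + 1))) := by
    apply pvRay_eq (s := (g.length : Int) - 1 - r)
    · simp [pvRaySteps]
    · omega
    · intro k hk
      apply pvCellB_eq <;> (simp; try omega)
  have eU : pvRayOcc g (g.length : Int) ((g.getD 0 []).length : Int) r c (-1) 0 =
      pvHit (pvMapD g (fun i => (r - i, c)) r) := by
    apply pvRay_eq (s := (r : Int))
    · simp [pvRaySteps]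
    · omega
    · intro k hk
      apply pvCellB_eq <;> (simp; try omega)
  have eUL : pvRayOcc g (g.length : Int) ((g.getD 0 []).length : Int) r c (-1) (-1) =
      pvHit (pvMapD g (fun i => (r - i, c - i)) (min r c)) := by
    apply pvRay_eq (s := min (r : Int) (c : Int))
    · simp [pvRaySteps]
    · omega
    · intro k hk
      apply pvCellB_eq <;> (simp; try omega)
  have eDR : pvRayOcc g (g.length : Int) ((g.getD 0 []).length : Int) r c 1 1 =
      pvHit (pvMapD g (fun i => (r + i, c + i))
        (min (g.length - 1 - r) ((g.getD 0 []).length - 1 - c))) := by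
    apply pvRay_eq (s := min ((g.length : Int) - 1 - r) (((g.getD 0 []).length : Int) - 1 - c))
    · simp [pvRaySteps]
    · omega
    · intro k hk
      apply pvCellB_eq <;> (simp; try omega)
  have eUR : pvRayOcc g (g.length : Int) ((g.getD 0 []).length : Int) r c (-1) 1 =
      pvHit (pvMapD g (fun i => (r - i, c + i)) (min r ((g.getD 0 []).length - 1 - c))) := by
    apply pvRay_eq (s := min (r : Int) (((g.getD 0 []).length : Int) - 1 - c))
    · simp [pvRaySteps]
    · omega
    · intro k hk
      apply pvCellB_eq <;> (simp; try omega)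
  have eDL : pvRayOcc g (g.length : Int) ((g.getD 0 []).length : Int) r c 1 (-1) =
      pvHit (pvMapD g (fun i => (r + i, c - i)) (min (g.length - 1 - r) c)) := by
    apply pvRay_eq (s := min ((g.length : Int) - 1 - r) (c : Int))
    · simp [pvRaySteps]
    · omega
    · intro k hk
      apply pvCellB_eq <;> (simp; try omega)
  -- A's diagonal strings
  have hdiag := pvDiag_fold g g.length ((g.getD 0 []).length) r c hr hc
    (max g.length ((g.getD 0 []).length) - 1)
  have m1 : min (min r c) (max g.length ((g.getD 0 []).length) - 1) = min r c := by omega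
  have m2 : min (min (g.length - 1 - r) ((g.getD 0 []).length - 1 - c))
      (max g.length ((g.getD 0 []).length) - 1)
      = min (g.length - 1 - r) ((g.getD 0 []).length - 1 - c) := by omega
  have m3 : min (min r ((g.getD 0 []).length - 1 - c))
      (max g.length ((g.getD 0 []).length) - 1) = min r ((g.getD 0 []).length - 1 - c) := by
    omega
  have m4 : min (min (g.length - 1 - r) c) (max g.length ((g.getD 0 []).length) - 1)
      = min (g.length - 1 - r) c := by omega
  rw [m1, m2, m3, m4] at hdiag
  -- assemble
  simp only [pvCountSeats, pvDirs]
  rw [hdiag, pvRight_line g r c, pvLeft_line g r c (le_trans (le_of_lt hc) hrow),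
    pvDown_line g r c, pvUp_line g r c (le_of_lt hr)]
  simp only [List.foldl_cons, List.foldl_nil]
  rw [eR, eL, eD, eU, eUL, eDR, eUR, eDL]
  generalize pvHit (pvMapD g (fun i => (r, c + i)) ((g.getD r []).length - (c + 1))) = b1
  generalize pvHit (pvMapD g (fun i => (r, c - i)) c) = b2
  generalize pvHit (pvMapD g (fun i => (r + i, c)) (g.length - (r + 1))) = b3
  generalize pvHit (pvMapD g (fun i => (r - i, c)) r) = b4
  generalize pvHit (pvMapD g (fun i => (r - i, c - i)) (min r c)) = b5
  generalize pvHit (pvMapD g (fun i => (r + i, c + i))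
    (min (g.length - 1 - r) ((g.getD 0 []).length - 1 - c))) = b6
  generalize pvHit (pvMapD g (fun i => (r - i, c + i)) (min r ((g.getD 0 []).length - 1 - c))) = b7
  generalize pvHit (pvMapD g (fun i => (r + i, c - i)) (min (g.length - 1 - r) c)) = b8
  revert b1 b2 b3 b4 b5 b6 b7 b8
  decide

-- the new character B assigns, seen from the A side (Nat coordinates)
def pvNC (g : List (List Char)) (r c : Nat) : Char :=
  pvNewChar g (g.length : Int) ((g.getD 0 []).length : Int) (r : Int) (c : Int)

theorem pvStepCol_eq (g : List (List Char)) (r c : Nat) (hr : r < g.length)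
    (hc : c < (g.getD 0 []).length)
    (hlen : ∀ l ∈ g, (g.getD 0 []).length ≤ l.length) (m : Bool) (l : List Char) :
    pvStepCol g r (m, l) c = (m || (pvNC g r c != pvCell g r c), l ++ [pvNC g r c]) := by
  have hcb : pvCellB g (r : Int) (c : Int) = pvCell g r c :=
    pvCellB_eq g _ _ _ _ (by simp) (by simp)
  simp only [pvStepCol, pvNC, pvNewChar, hcb, ← pvCount_eq g r c hr hc hlen]
  by_cases hL : pvCell g r c = 'L'
  · by_cases h0 : pvCountSeats r c g = 0 <;> simp [hL, h0]
  · by_cases hH : pvCell g r c = '#'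
    · by_cases h5 : 5 ≤ pvCountSeats r c g <;> simp [hH, h5]
    · simp [hL, hH]

theorem pvAny_congr_mem {α : Type} (l : List α) (p q : α → Bool)
    (h : ∀ a ∈ l, p a = q a) : l.any p = l.any q := by
  induction l with
  | nil => rfl
  | cons x t ih =>
    simp only [List.any_cons, h x (by simp)]
    rw [ih (fun a ha => h a (by simp [ha]))]

theorem pvInner (g : List (List Char)) (r : Nat) (hr : r < g.length)
    (hlen : ∀ l ∈ g, (g.getD 0 []).length ≤ l.length) :
    ∀ n, n ≤ (g.getD 0 []).length → ∀ (m : Bool) (l : List Char),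
      (List.range n).foldl (pvStepCol g r) (m, l) =
        (m || (List.range n).any (fun c => pvNC g r c != pvCell g r c),
         l ++ (List.range n).map (pvNC g r)) := by
  intro n
  induction n with
  | zero => intro _ m l; simp
  | succ n ih =>
    intro hn m l
    rw [List.range_succ, List.foldl_append, ih (by omega)]
    simp only [List.foldl_cons, List.foldl_nil]
    rw [pvStepCol_eq g r n hr (by omega) hlen]
    simp [List.any_append, Bool.or_assoc]

theorem pvOuter (g : List (List Char))
    (hlen : ∀ l ∈ g, (g.getD 0 []).length ≤ l.length) :
    ∀ n, n ≤ g.length → ∀ (m : Bool) (L : List String),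
      (List.range n).foldl (pvStepRow g ((g.getD 0 []).length)) (m, L) =
        (m || (List.range n).any (fun r =>
            (List.range ((g.getD 0 []).length)).any (fun c => pvNC g r c != pvCell g r c)),
         L ++ (List.range n).map (fun r =>
            String.ofList ((List.range ((g.getD 0 []).length)).map (pvNC g r)))) := by
  intro n
  induction n with
  | zero => intro _ m L; simp
  | succ n ih =>
    intro hn m L
    rw [List.range_succ, List.foldl_append, ih (by omega)]
    simp only [List.foldl_cons, List.foldl_nil, pvStepRow]
    rw [pvInner g n (by omega) hlen _ le_rfl]
    simp [List.any_append, Bool.or_assoc]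

-- ===== VERDICT (by name: the statement is the Claim_ definition above) =====
theorem file_people_in_spec : Claim_equal_file_people_in := by
  intro data _ hpre
  obtain ⟨hne, hlen0⟩ := hpre
  unfold Spec_file_people_in
  cases data with
  | nil => exact absurd rfl hne
  | cons d t =>
    have hlen : ∀ l ∈ ((d :: t).map String.toList),
        (((d :: t).map String.toList).getD 0 []).length ≤ l.length := by
      intro l hl
      rcases List.mem_map.mp hl with ⟨s, hs, rfl⟩
      have h := hlen0 s hs
      simpa using h
    simp only [file_people_in, file_people_in_alt]
    rw [pvOuter _ hlen _ le_rfl false []]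
    rw [PySem.List.pyRange_zero_nat, PySem.List.pyRange_zero_nat]
    simp only [List.map_map, List.any_map, Bool.false_or, List.nil_append]
    refine Prod.ext ?_ ?_
    · -- the moved flag
      apply pvAny_congr_mem
      intro rN hrN
      simp only [List.mem_range] at hrN
      simp only [Function.comp]
      apply pvAny_congr_mem
      intro cN hcN
      simp only [List.mem_range] at hcN
      have h2 : pvCellB ((d :: t).map String.toList) (rN : Int) (cN : Int)
          = pvCell ((d :: t).map String.toList) rN cN :=
        pvCellB_eq _ _ _ _ _ (by simp) (by simp)
      have h1 : pvCellB ((List.range ((d :: t).map String.toList).length).map (fun rM =>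
            (List.range ((((d :: t).map String.toList).getD 0 []).length)).map
              (fun cM => pvNC ((d :: t).map String.toList) rM cM))) (rN : Int) (cN : Int)
          = pvNC ((d :: t).map String.toList) rN cN := by
        unfold pvCellB
        rw [Int.toNat_natCast, Int.toNat_natCast,
          List.getD_eq_getElem _ [] (by simpa using hrN), List.getElem_map, List.getElem_range,
          List.getD_eq_getElem _ '?' (by simpa using hcN), List.getElem_map, List.getElem_range]
      rw [← h1, ← h2]
      rfl
    · -- the grid
      apply List.map_congr_left
      intro rN _
      rfl
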